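-- pv_equiv track=rewrite | github.com/XCDUX/Teaser-plus-plus | scale.py | group_errors
-- ===== SOURCE A (Python) =====
-- def group_errors(error_dict, group_size=10):
--     groups = {}
--     sorted_keys = sorted(error_dict.keys())
--     for key in sorted_keys:
--         group_idx = (key - 1) // group_size
--         group_label = f"{group_idx*group_size+1}-{(group_idx+1)*group_size}"
--         if group_label not in groups:
--             groups[group_label] = []
--         groups[group_label].extend(error_dict[key])
--     return groups
-- ===== SOURCE B (Python) =====
-- def group_errors(error_dict, group_size=10):
--     buckets = {}
--     for k in error_dict:
--         buckets.setdefault((k - 1) // group_size, []).append(k)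
--     result = {}
--     for g in sorted(buckets):
--         label = f"{g*group_size+1}-{(g+1)*group_size}"
--         vals = []
--         for k in sorted(buckets[g]):
--             vals.extend(error_dict[k])
--         result[label] = vals
--     return result
-- ===== Notes on version B (the rewrite author's own statement) =====
-- stated objective: alternative
-- what changed: A sorts all keys up front and folds them into a label-keyed dict with a membership test and incremental extend per key; B never does the global key sort: it buckets keys by group index in one dict pass, then walks the bucket indices in ascending order, sorting each bucket's keys and concatenating their error lists. Pre_ excludes group_size = 0 with a nonempty dict (A raises ZeroDivisionError) and negative group sizes whose keys fall into at least two distinct buckets, where the order of the labels in the returned dict is an accident of insertion order (A descending, B ascending).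
-- outside the precondition, e.g. on group_errors({1: [1], 5: [2]}, -2): A returns {'1--2': [1], '5-2': [2]}, B returns {'5-2': [2], '1--2': [1]}
import Mathlib
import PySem

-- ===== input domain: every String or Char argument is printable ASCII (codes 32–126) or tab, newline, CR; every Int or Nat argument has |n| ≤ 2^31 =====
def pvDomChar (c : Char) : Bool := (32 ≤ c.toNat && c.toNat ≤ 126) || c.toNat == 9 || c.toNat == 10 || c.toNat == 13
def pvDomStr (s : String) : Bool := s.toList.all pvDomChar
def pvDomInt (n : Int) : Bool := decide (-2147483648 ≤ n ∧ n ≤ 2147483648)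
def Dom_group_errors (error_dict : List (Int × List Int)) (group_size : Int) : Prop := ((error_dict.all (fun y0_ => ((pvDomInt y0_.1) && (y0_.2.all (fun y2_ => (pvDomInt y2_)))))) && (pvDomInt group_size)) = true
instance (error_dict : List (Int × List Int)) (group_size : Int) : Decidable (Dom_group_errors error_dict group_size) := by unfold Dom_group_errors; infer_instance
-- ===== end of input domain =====

-- B replaces A's incremental label-keyed dict fold by "bucket keys by group index, then walk the
-- bucket indices in ascending order" (objective: alternative decomposition, not faster).

-- ===== PORT A =====
def group_errors (error_dict : List (Int × List Int)) (group_size : Int) : List (String × List Int) :=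
  let d := PySem.Dict.ofList error_dict
  let sorted_keys := PySem.List.sorted d.keys (fun k => k) false
  let groups := sorted_keys.foldl (fun groups key =>
      let group_idx := PySem.Int.floordiv (key - 1) group_size
      let group_label := PySem.Int.toStr (group_idx * group_size + 1) ++ "-" ++
                         PySem.Int.toStr ((group_idx + 1) * group_size)
      let groups := if groups.contains group_label then groups
                    else groups.insert group_label ([] : List Int)
      groups.modify group_label [] (fun v => v ++ d.getD key [])) PySem.Dict.empty
  groups.items

-- ===== PORT B =====
def group_errors_alt (error_dict : List (Int × List Int)) (group_size : Int) : List (String × List Int) :=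
  let d := PySem.Dict.ofList error_dict
  -- buckets.setdefault((k - 1) // group_size, []).append(k): the list returned by setdefault is
  -- extended in place, i.e. the entry becomes its old value (default []) with k appended
  let buckets := d.keys.foldl (fun buckets k =>
      (buckets.setdefault (PySem.Int.floordiv (k - 1) group_size) []).modify
        (PySem.Int.floordiv (k - 1) group_size) [] (fun l => l ++ [k])) PySem.Dict.empty
  let result := (PySem.List.sorted buckets.keys (fun g => g) false).foldl
      (fun result g =>
        let label := PySem.Int.toStr (g * group_size + 1) ++ "-" ++
                     PySem.Int.toStr ((g + 1) * group_size)
        let vals := (PySem.List.sorted (buckets.getD g []) (fun k => k) false).foldl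
            (fun vals k => vals ++ d.getD k []) []
        result.insert label vals) PySem.Dict.empty
  result.items

-- ===== PRECONDITION & SPEC =====
-- Pre_ excludes group_size = 0 with a nonempty dict (A raises ZeroDivisionError there) and
-- negative group sizes whose keys fall into at least two distinct buckets, where the order of
-- the labels in the returned dict is an accident of insertion order (A descending, B ascending).
def Pre_group_errors (error_dict : List (Int × List Int)) (group_size : Int) : Prop :=
  0 < group_size ∨ error_dict = [] ∨
    (group_size ≠ 0 ∧ ∀ p ∈ error_dict, ∀ q ∈ error_dict,
      PySem.Int.floordiv (p.1 - 1) group_size = PySem.Int.floordiv (q.1 - 1) group_size)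
instance (error_dict : List (Int × List Int)) (group_size : Int) : Decidable (Pre_group_errors error_dict group_size) := by unfold Pre_group_errors; infer_instance
def pvWitness_group_errors : (List (Int × List Int)) × Int := ([(3, [1]), (12, [7, 8])], 10)
def Spec_group_errors (error_dict : List (Int × List Int)) (group_size : Int) (out : List (String × List Int)) : Prop := out = group_errors_alt error_dict group_size
instance (error_dict : List (Int × List Int)) (group_size : Int) (out : List (String × List Int)) : Decidable (Spec_group_errors error_dict group_size out) := by unfold Spec_group_errors; infer_instance

-- ===== CLAIM (what is proved, stated in full; the proofs are below) =====
def Claim_equal_group_errors : Prop := ∀ (error_dict : List (Int × List Int)) (group_size : Int), Dom_group_errors error_dict group_size → Pre_group_errors error_dict group_size → Spec_group_errors error_dict group_size (group_errors error_dict group_size)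

-- ===== LEMMAS AND PROOFS =====

-- the group index and group label of A's/B's shared formula, and shorthands for the shared data
def pvGrp (s k : Int) : Int := PySem.Int.floordiv (k - 1) s
def pvLbl (s gi : Int) : String :=
  PySem.Int.toStr (gi * s + 1) ++ "-" ++ PySem.Int.toStr ((gi + 1) * s)
def pvD (ed : List (Int × List Int)) : PySem.Dict Int (List Int) := PySem.Dict.ofList ed
def pvKs (ed : List (Int × List Int)) : List Int := PySem.List.sorted (pvD ed).keys (fun k => k) false
def pvV (ed : List (Int × List Int)) (k : Int) : List Int := (pvD ed).getD k []
def pvBStep (s : Int) : PySem.Dict Int (List Int) → Int → PySem.Dict Int (List Int) :=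
  fun buckets k =>
    (buckets.setdefault (pvGrp s k) []).modify (pvGrp s k) [] (fun l => l ++ [k])
def pvBuckets (ed : List (Int × List Int)) (s : Int) : PySem.Dict Int (List Int) :=
  (pvD ed).keys.foldl (pvBStep s) PySem.Dict.empty

-- ---- decimal-representation facts (str(n) is injective and contains '-' only as its head) ----

theorem pv_toDigitsCore_succ (b f n : Nat) (ds : List Char) :
    Nat.toDigitsCore b (f + 1) n ds =
      (if n / b = 0 then Nat.digitChar (n % b) :: ds
       else Nat.toDigitsCore b f (n / b) (Nat.digitChar (n % b) :: ds)) := rfl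

theorem pv_digits_toDigits : ∀ (f n : Nat), 0 < n → n < f → ∀ ds : List Char,
    Nat.toDigitsCore 10 f n ds = ((Nat.digits 10 n).map Nat.digitChar).reverse ++ ds := by
  intro f
  induction f with
  | zero => intro n _ h; omega
  | succ f ih =>
    intro n hn hf ds
    rw [pv_toDigitsCore_succ]
    rw [Nat.digits_def' (by norm_num : 1 < 10) hn]
    by_cases h : n / 10 = 0
    · rw [if_pos h, h, Nat.digits_zero]
      simp
    · have hlt : n / 10 < f := by
        have := Nat.div_lt_self hn (by norm_num : 1 < 10)
        omega
      rw [if_neg h, ih (n / 10) (Nat.pos_of_ne_zero h) hlt]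
      simp

theorem pv_toDigits_zero : Nat.toDigits 10 0 = ['0'] := rfl

theorem pv_toDigits_eq {n : Nat} (hn : n ≠ 0) :
    Nat.toDigits 10 n = ((Nat.digits 10 n).map Nat.digitChar).reverse := by
  have := pv_digits_toDigits (n + 1) n (Nat.pos_of_ne_zero hn) (by omega) []
  simpa [Nat.toDigits] using this

theorem pv_digitChar_ne_dash (n : Nat) : Nat.digitChar n ≠ '-' := by
  by_cases h : n < 16
  · interval_cases n <;> decide
  · have h0 : Nat.digitChar n = '*' := by
      unfold Nat.digitChar
      rw [if_neg (by omega), if_neg (by omega), if_neg (by omega), if_neg (by omega),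
          if_neg (by omega), if_neg (by omega), if_neg (by omega), if_neg (by omega),
          if_neg (by omega), if_neg (by omega), if_neg (by omega), if_neg (by omega),
          if_neg (by omega), if_neg (by omega), if_neg (by omega), if_neg (by omega)]
    rw [h0]; decide

theorem pv_digitChar_inj10 : ∀ a < 10, ∀ b < 10, Nat.digitChar a = Nat.digitChar b → a = b := by
  decide

theorem pv_map_digitChar_inj : ∀ (l1 l2 : List Nat), (∀ a ∈ l1, a < 10) → (∀ a ∈ l2, a < 10) →
    l1.map Nat.digitChar = l2.map Nat.digitChar → l1 = l2 := by
  intro l1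
  induction l1 with
  | nil => intro l2 _ _ h; cases l2 <;> simp_all
  | cons a t ih =>
    intro l2 h1 h2 h
    cases l2 with
    | nil => simp_all
    | cons b t' =>
      simp only [List.map_cons, List.cons.injEq] at h
      have ha := pv_digitChar_inj10 a (h1 a (by simp)) b (h2 b (by simp)) h.1
      subst ha
      have := ih t' (fun x hx => h1 x (by simp [hx])) (fun x hx => h2 x (by simp [hx])) h.2
      simp [this]

theorem pv_toDigits_single_zero {n : Nat} (h : Nat.toDigits 10 n = ['0']) : n = 0 := by
  by_contra hn
  rw [pv_toDigits_eq hn] at h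
  have h' : (Nat.digits 10 n).map Nat.digitChar = ['0'] := by
    have := congrArg List.reverse h
    simpa using this
  cases hd : Nat.digits 10 n with
  | nil => rw [hd] at h'; simp at h'
  | cons d t =>
    rw [hd] at h'
    simp only [List.map_cons, List.cons.injEq] at h'
    obtain ⟨hc, ht⟩ := h'
    have hd10 : d < 10 := Nat.digits_lt_base (by norm_num) (by rw [hd]; simp)
    have hd0 : d = 0 := pv_digitChar_inj10 d hd10 0 (by norm_num) (by rw [hc]; rfl)
    have ht0 : t = [] := by simpa using ht
    have hofd := Nat.ofDigits_digits 10 n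
    rw [hd, hd0, ht0] at hofd
    simp [Nat.ofDigits] at hofd
    omega

theorem pv_toDigits_inj {m n : Nat} (h : Nat.toDigits 10 m = Nat.toDigits 10 n) : m = n := by
  by_cases hm : m = 0 <;> by_cases hn : n = 0
  · omega
  · subst hm
    rw [pv_toDigits_zero] at h
    have := pv_toDigits_single_zero h.symm
    omega
  · subst hn
    rw [pv_toDigits_zero] at h
    have := pv_toDigits_single_zero h
    omega
  · rw [pv_toDigits_eq hm, pv_toDigits_eq hn] at h
    have h' := congrArg List.reverse h
    simp only [List.reverse_reverse] at h'
    have := pv_map_digitChar_inj _ _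
      (fun a ha => Nat.digits_lt_base (by norm_num) ha)
      (fun a ha => Nat.digits_lt_base (by norm_num) ha) h'
    calc m = Nat.ofDigits 10 (Nat.digits 10 m) := (Nat.ofDigits_digits 10 m).symm
      _ = Nat.ofDigits 10 (Nat.digits 10 n) := by rw [this]
      _ = n := Nat.ofDigits_digits 10 n

theorem pv_toDigits_ne_dash (n : Nat) : ∀ c ∈ Nat.toDigits 10 n, c ≠ '-' := by
  intro c hc
  by_cases hn : n = 0
  · rw [hn, pv_toDigits_zero] at hc; simp at hc; simp [hc]
  · rw [pv_toDigits_eq hn] at hc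
    rw [List.mem_reverse, List.mem_map] at hc
    obtain ⟨d, _, hd⟩ := hc
    rw [← hd]
    exact pv_digitChar_ne_dash d

theorem pv_toDigits_ne_nil (n : Nat) : Nat.toDigits 10 n ≠ [] := by
  by_cases hn : n = 0
  · rw [hn, pv_toDigits_zero]; simp
  · rw [pv_toDigits_eq hn]
    simp [Nat.digits_ne_nil_iff_ne_zero.mpr hn]

theorem pv_toChars_inj {a b : Int} (h : PySem.Int.toChars a = PySem.Int.toChars b) : a = b := by
  unfold PySem.Int.toChars at h
  by_cases ha : a < 0 <;> by_cases hb : b < 0 <;> simp [ha, hb] at h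
  · have := pv_toDigits_inj h
    omega
  · exfalso
    cases hD : Nat.toDigits 10 b.toNat with
    | nil => exact pv_toDigits_ne_nil _ hD
    | cons c t =>
      rw [hD] at h
      have hc : c = '-' := by
        have := congrArg (fun l => l.head?) h
        simp at this; exact this.symm
      exact pv_toDigits_ne_dash b.toNat c (by rw [hD]; simp) hc
  · exfalso
    cases hD : Nat.toDigits 10 a.toNat with
    | nil => exact pv_toDigits_ne_nil _ hD
    | cons c t =>
      rw [hD] at h
      have hc : c = '-' := by
        have := congrArg (fun l => l.head?) h
        simp at this; exact this
      exact pv_toDigits_ne_dash a.toNat c (by rw [hD]; simp) hc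
  · have := pv_toDigits_inj h
    omega

theorem pv_cleanSplit : ∀ (u u' ys ys' : List Char), (∀ c ∈ u, c ≠ '-') → (∀ c ∈ u', c ≠ '-') →
    u ++ '-' :: ys = u' ++ '-' :: ys' → u = u' ∧ ys = ys' := by
  intro u
  induction u with
  | nil =>
    intro u' ys ys' _ h2 h
    cases u' with
    | nil => simp_all
    | cons c t =>
      exfalso
      simp only [List.nil_append, List.cons_append, List.cons.injEq] at h
      exact h2 c (by simp) h.1.symm
  | cons c t ih =>
    intro u' ys ys' h1 h2 h
    cases u' with
    | nil =>
      exfalso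
      simp only [List.nil_append, List.cons_append, List.cons.injEq] at h
      exact h1 c (by simp) h.1
    | cons c' t' =>
      simp only [List.cons_append, List.cons.injEq] at h
      obtain ⟨hc, h⟩ := h
      have := ih t' ys ys' (fun x hx => h1 x (by simp [hx])) (fun x hx => h2 x (by simp [hx])) h
      simp_all

theorem pv_charsSplit {x x' : Int} {r r' : List Char}
    (h : PySem.Int.toChars x ++ '-' :: r = PySem.Int.toChars x' ++ '-' :: r') : x = x' := by
  apply pv_toChars_inj
  unfold PySem.Int.toChars at h ⊢
  by_cases hx : x < 0 <;> by_cases hx' : x' < 0 <;>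
    simp only [hx, hx', if_pos, if_neg, not_false_iff] at h ⊢
  · simp only [List.cons_append, List.cons.injEq] at h
    have := pv_cleanSplit _ _ _ _ (pv_toDigits_ne_dash _) (pv_toDigits_ne_dash _) h.2
    simp [this.1]
  · exfalso
    cases hD : Nat.toDigits 10 x'.toNat with
    | nil => exact pv_toDigits_ne_nil _ hD
    | cons c t =>
      rw [hD] at h
      simp only [List.cons_append, List.cons.injEq] at h
      exact pv_toDigits_ne_dash x'.toNat c (by rw [hD]; simp) h.1.symm
  · exfalso
    cases hD : Nat.toDigits 10 x.toNat with
    | nil => exact pv_toDigits_ne_nil _ hD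
    | cons c t =>
      rw [hD] at h
      simp only [List.cons_append, List.cons.injEq] at h
      exact pv_toDigits_ne_dash x.toNat c (by rw [hD]; simp) h.1
  · exact (pv_cleanSplit _ _ _ _ (pv_toDigits_ne_dash _) (pv_toDigits_ne_dash _) h).1

theorem pv_lbl_inj {s : Int} (hs : s ≠ 0) : Function.Injective (pvLbl s) := by
  intro a b h
  have htl := congrArg String.toList h
  have hdash : ("-" : String).toList = ['-'] := rfl
  simp only [pvLbl, String.toList_append, PySem.Int.toList_toStr, hdash] at htl
  rw [List.append_assoc, List.append_assoc, List.singleton_append, List.singleton_append] at htl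
  have hx := pv_charsSplit htl
  have : a * s = b * s := by linarith
  exact mul_right_cancel₀ hs this

-- ---- the group index is monotone along nondecreasing keys (positive group size) ----

theorem pv_grp_mono {s : Int} (hs : 0 < s) {k k' : Int} (h : k ≤ k') :
    pvGrp s k ≤ pvGrp s k' := by
  have hx := PySem.Int.floordiv_mul_add_mod (k - 1) s
  have hy := PySem.Int.floordiv_mul_add_mod (k' - 1) s
  unfold pvGrp
  set gx := PySem.Int.floordiv (k - 1) s
  set gy := PySem.Int.floordiv (k' - 1) s
  set rx := PySem.Int.mod (k - 1) s
  set ry := PySem.Int.mod (k' - 1) s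
  have hrx1 : 0 ≤ rx := PySem.Int.mod_nonneg (k - 1) hs
  have hrx2 : rx < s := PySem.Int.mod_lt (k - 1) hs
  have hry1 : 0 ≤ ry := PySem.Int.mod_nonneg (k' - 1) hs
  have hry2 : ry < s := PySem.Int.mod_lt (k' - 1) hs
  by_contra hcl
  have hc1 : gy + 1 ≤ gx := by omega
  have hprod : 0 ≤ (gx - gy - 1) * s := mul_nonneg (by omega) (by linarith)
  nlinarith

-- ---- PySem.Set facts for this proof ----

theorem pv_foldl_add_split {α : Type} [BEq α] : ∀ (l acc : List α),
    ∃ t, List.foldl PySem.Set.add acc l = acc ++ t ∧ t.Sublist l := by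
  intro l
  induction l with
  | nil => intro acc; exact ⟨[], by simp⟩
  | cons x xs ih =>
    intro acc
    simp only [List.foldl_cons]
    by_cases hc : (PySem.Set.add acc x) = acc
    · obtain ⟨t, ht, hsub⟩ := ih acc
      rw [hc]
      exact ⟨t, ht, hsub.cons x⟩
    · have hadd : PySem.Set.add acc x = acc ++ [x] := by
        unfold PySem.Set.add at hc ⊢
        split_ifs at hc ⊢ with hcc
        · exact absurd rfl hc
        · rfl
      obtain ⟨t, ht, hsub⟩ := ih (acc ++ [x])
      rw [hadd, ht, List.append_assoc]
      exact ⟨x :: t, rfl, hsub.cons₂ x⟩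

theorem pv_ofList_sublist {α : Type} [BEq α] (l : List α) : (PySem.Set.ofList l).Sublist l := by
  rw [PySem.Set.ofList_eq_foldl]
  obtain ⟨t, ht, hsub⟩ := pv_foldl_add_split l []
  rw [ht]
  simpa using hsub

theorem pv_ofList_map_inj {α β : Type} [BEq α] [LawfulBEq α] [BEq β] [LawfulBEq β]
    {f : α → β} (hf : Function.Injective f) : ∀ (l : List α),
    PySem.Set.ofList (l.map f) = (PySem.Set.ofList l).map f := by
  intro l
  induction l using List.reverseRecOn with
  | nil => rfl
  | append_singleton t x ih =>
    rw [List.map_append, List.map_singleton, PySem.Set.ofList_append_singleton,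
        PySem.Set.ofList_append_singleton, ih]
    by_cases hx : x ∈ PySem.Set.ofList t
    · have h1 : List.contains (PySem.Set.ofList t) x = true := List.contains_iff_mem.mpr hx
      have h2 : List.contains ((PySem.Set.ofList t).map f) (f x) = true :=
        List.contains_iff_mem.mpr (List.mem_map.mpr ⟨x, hx, rfl⟩)
      simp only [PySem.Set.add, PySem.Set.contains]
      rw [if_pos h2, if_pos h1]
    · have hnm : ¬ f x ∈ (PySem.Set.ofList t).map f := by
        intro hm
        rcases List.mem_map.mp hm with ⟨y, hy, hfy⟩
        exact hx (hf hfy ▸ hy)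
      simp only [PySem.Set.add, PySem.Set.contains]
      rw [if_neg (fun hcb => hnm (List.contains_iff_mem.mp hcb)),
          if_neg (fun hcb => hx (List.contains_iff_mem.mp hcb)),
          List.map_append, List.map_singleton]

theorem pv_ofList_perm {α : Type} [BEq α] [LawfulBEq α] {l l' : List α} (h : l.Perm l') :
    (PySem.Set.ofList l).Perm (PySem.Set.ofList l') := by
  apply List.Subperm.antisymm
  · exact (PySem.Set.nodup_ofList l).subperm (fun a ha =>
      (PySem.Set.mem_ofList l' a).mpr (h.mem_iff.mp ((PySem.Set.mem_ofList l a).mp ha)))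
  · exact (PySem.Set.nodup_ofList l').subperm (fun a ha =>
      (PySem.Set.mem_ofList l a).mpr (h.mem_iff.mpr ((PySem.Set.mem_ofList l' a).mp ha)))

-- ---- A's fold computes the group-by of its key list ----

theorem pv_groupFold_items {κ : Type} [BEq κ] [LawfulBEq κ] (K : Int → κ) (V : Int → List Int) :
    ∀ ks : List Int,
    (ks.foldl (fun d0 k =>
        (if d0.contains (K k) then d0 else d0.insert (K k) ([] : List Int)).modify (K k) []
          (fun v => v ++ V k)) PySem.Dict.empty).items
      = (PySem.Set.ofList (ks.map K)).map
          (fun L => (L, ((ks.filter (fun k => K k == L)).flatMap V))) := by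
  intro ks
  induction ks using List.reverseRecOn with
  | nil => rfl
  | append_singleton t k ih =>
    rw [List.foldl_append, List.map_append, List.map_singleton,
        PySem.Set.ofList_append_singleton]
    simp only [List.foldl_cons, List.foldl_nil]
    set D := t.foldl (fun d0 k =>
        (if d0.contains (K k) then d0 else d0.insert (K k) ([] : List Int)).modify (K k) []
          (fun v => v ++ V k)) PySem.Dict.empty with hD
    set S := PySem.Set.ofList (t.map K) with hS
    have hkeys : D.keys = S := by
      have hk0 : D.keys = List.map (fun p => p.1) D.items := rfl
      rw [hk0, ih, List.map_map]
      simp [Function.comp_def]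
    have hnodupS : S.Nodup := by rw [hS]; exact PySem.Set.nodup_ofList _
    have hnodup : D.keys.Nodup := by rw [hkeys]; exact hnodupS
    by_cases hmem : K k ∈ S
    · have hcont : D.contains (K k) = true :=
        (PySem.Dict.contains_iff_mem_keys D (K k)).mpr (by rw [hkeys]; exact hmem)
      rw [if_pos hcont]
      have hgetD := PySem.Dict.getD_of_mem_items D
        (show (K k, (t.filter (fun k' => K k' == K k)).flatMap V) ∈ D.items by
          rw [ih]; exact List.mem_map.mpr ⟨K k, hmem, rfl⟩) hnodup
      have hadd : PySem.Set.add S (K k) = S := by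
        have hc : PySem.Set.contains S (K k) = true := by
          simp only [PySem.Set.contains]
          exact List.contains_iff_mem.mpr hmem
        simp only [PySem.Set.add]
        rw [if_pos hc]
      rw [hadd]
      simp only [PySem.Dict.modify]
      rw [hgetD]
      rw [PySem.Dict.items_insert_of_contains D _ hcont, ih, List.map_map]
      apply List.map_congr_left
      intro L hL
      simp only [Function.comp_def]
      by_cases hLk : L = K k
      · subst hLk
        simp [List.filter_append, List.flatMap_append]
      · have hb1 : (L == K k) = false := by
          rw [beq_eq_false_iff_ne]; exact hLk
        have hb2 : (K k == L) = false := by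
          rw [beq_eq_false_iff_ne]; exact Ne.symm hLk
        simp [List.filter_append, hb1, hb2]
    · have hcont : D.contains (K k) = false := by
        cases hcb : D.contains (K k) with
        | false => rfl
        | true =>
          have hxk := (PySem.Dict.contains_iff_mem_keys D (K k)).mp hcb
          rw [hkeys] at hxk
          exact absurd hxk hmem
      rw [if_neg (by simp [hcont])]
      simp only [PySem.Dict.modify, PySem.Dict.getD_insert_self, List.nil_append,
                 PySem.Dict.insert_insert_self]
      rw [PySem.Dict.items_insert_of_not_contains D _ hcont, ih]
      have haddf : PySem.Set.add S (K k) = S ++ [K k] := by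
        have hc : ¬ PySem.Set.contains S (K k) = true := by
          simp only [PySem.Set.contains]
          exact fun hcb => hmem (List.contains_iff_mem.mp hcb)
        simp only [PySem.Set.add]
        rw [if_neg hc]
      rw [haddf, List.map_append, List.map_singleton]
      congr 1
      · apply List.map_congr_left
        intro L hL
        have hb2 : (K k == L) = false := by
          rw [beq_eq_false_iff_ne]
          intro he
          exact hmem (he ▸ hL)
        simp [List.filter_append, hb2]
      · have hfilt : t.filter (fun k' => K k' == K k) = [] := by
          rw [List.filter_eq_nil_iff]
          intro a ha hbeq
          exact hmem (by rw [hS, PySem.Set.mem_ofList]; exact List.mem_map.mpr ⟨a, ha, eq_of_beq hbeq⟩)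
        simp [List.filter_append, hfilt]

-- ---- the main equality (0 < group_size) ----

set_option maxHeartbeats 1000000 in
theorem pv_main_eq (error_dict : List (Int × List Int)) (group_size : Int) (hs : group_size ≠ 0)
    (hmono : List.Pairwise (fun a b => pvGrp group_size a ≤ pvGrp group_size b) (pvKs error_dict)) :
    group_errors error_dict group_size = group_errors_alt error_dict group_size := by
  -- A's result, by the group-by lemma
  have hA : group_errors error_dict group_size
      = (PySem.Set.ofList ((pvKs error_dict).map (fun k => pvLbl group_size (pvGrp group_size k)))).map
          (fun L => (L, (((pvKs error_dict).filter
              (fun k => pvLbl group_size (pvGrp group_size k) == L)).flatMap (pvV error_dict)))) :=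
    pv_groupFold_items (fun k => pvLbl group_size (pvGrp group_size k)) (pvV error_dict) (pvKs error_dict)
  -- order facts about the sorted key list and the group-index sets
  have hksperm : (pvKs error_dict).Perm (pvD error_dict).keys :=
    PySem.List.sorted_perm (pvD error_dict).keys (fun k => k) false
  have hksnodup : (pvKs error_dict).Nodup :=
    hksperm.nodup_iff.mpr (PySem.Dict.nodup_keys_ofList error_dict)
  have hkslt : List.Pairwise (fun a b : Int => a < b) (pvKs error_dict) := by
    have h1 : List.Pairwise (fun a b : Int => a ≤ b) (pvKs error_dict) :=
      PySem.List.sorted_pairwise (pvD error_dict).keys (fun k => k)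
    exact (h1.and hksnodup).imp (fun hab => lt_of_le_of_ne hab.1 hab.2)
  have hpairlt : List.Pairwise (fun a b : Int => a < b)
      (PySem.Set.ofList ((pvKs error_dict).map (pvGrp group_size))) := by
    have h3 := (List.pairwise_map (R := fun a b : Int => a ≤ b)
        (f := pvGrp group_size)).mpr hmono
    have h4 := List.Pairwise.sublist
      (pv_ofList_sublist ((pvKs error_dict).map (pvGrp group_size))) h3
    have h5 := h4.and (PySem.Set.nodup_ofList ((pvKs error_dict).map (pvGrp group_size)))
    exact h5.imp (fun hab => lt_of_le_of_ne hab.1 hab.2)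
  have hG0perm : (PySem.Set.ofList ((pvKs error_dict).map (pvGrp group_size))).Perm
      (PySem.Set.ofList ((pvD error_dict).keys.map (pvGrp group_size))) :=
    pv_ofList_perm (hksperm.map (pvGrp group_size))
  -- the bucket dict of B is the group-by of the (unsorted) key list
  have hstep : pvBStep group_size = (fun (d0 : PySem.Dict Int (List Int)) (k : Int) =>
      (if d0.contains (pvGrp group_size k) then d0
       else d0.insert (pvGrp group_size k) ([] : List Int)).modify (pvGrp group_size k) []
        (fun v => v ++ [k])) := by
    funext b k
    unfold pvBStep
    by_cases h : b.contains (pvGrp group_size k) = true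
    · simp only [PySem.Dict.setdefault, if_pos h]
    · simp only [PySem.Dict.setdefault, PySem.Dict.insert, if_neg h]
  have hBkItems : (pvBuckets error_dict group_size).items
      = (PySem.Set.ofList ((pvD error_dict).keys.map (pvGrp group_size))).map
          (fun g => (g, (pvD error_dict).keys.filter (fun k => pvGrp group_size k == g))) := by
    have h1 := pv_groupFold_items (pvGrp group_size) (fun k => [k]) (pvD error_dict).keys
    show ((pvD error_dict).keys.foldl (pvBStep group_size) PySem.Dict.empty).items = _
    rw [hstep, h1]
    simp [List.flatMap_singleton']
  have hBkKeys : (pvBuckets error_dict group_size).keys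
      = PySem.Set.ofList ((pvD error_dict).keys.map (pvGrp group_size)) := by
    have hk0 : (pvBuckets error_dict group_size).keys
        = List.map (fun p => p.1) (pvBuckets error_dict group_size).items := rfl
    rw [hk0, hBkItems, List.map_map]
    simp [Function.comp_def]
  have hBkNodup : (pvBuckets error_dict group_size).keys.Nodup := by
    rw [hBkKeys]; exact PySem.Set.nodup_ofList _
  have hGsorted : PySem.List.sorted (pvBuckets error_dict group_size).keys
        (fun g => g) false
      = PySem.Set.ofList ((pvKs error_dict).map (pvGrp group_size)) := by
    rw [hBkKeys]
    exact PySem.List.sorted_eq_of_perm_of_pairwise_lt _ _ _ hG0perm hpairlt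
  have hnodmap : (((PySem.Set.ofList ((pvKs error_dict).map (pvGrp group_size)))).map
      (fun g => pvLbl group_size g)).Nodup :=
    List.Nodup.map (pv_lbl_inj hs) (PySem.Set.nodup_ofList _)
  have hB0 : group_errors_alt error_dict group_size
      = ((PySem.List.sorted (pvBuckets error_dict group_size).keys (fun g => g) false).foldl
          (fun r g => r.insert (pvLbl group_size g)
            ((PySem.List.sorted ((pvBuckets error_dict group_size).getD g []) (fun k => k) false).foldl
              (fun vals k => vals ++ (pvD error_dict).getD k []) []))
          PySem.Dict.empty).items := rfl
  have hB : group_errors_alt error_dict group_size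
      = (PySem.Set.ofList ((pvKs error_dict).map (pvGrp group_size))).map
          (fun g => (pvLbl group_size g,
            ((PySem.List.sorted ((pvBuckets error_dict group_size).getD g []) (fun k => k) false).foldl
              (fun vals k => vals ++ (pvD error_dict).getD k []) []))) := by
    rw [hB0, hGsorted,
        PySem.Dict.items_foldl_insert_fresh _ _ _ _ (fun a _ => PySem.Dict.contains_empty _) hnodmap]
    rfl
  have hSetmap : PySem.Set.ofList ((pvKs error_dict).map (fun k => pvLbl group_size (pvGrp group_size k)))
      = (PySem.Set.ofList ((pvKs error_dict).map (pvGrp group_size))).map (pvLbl group_size) := by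
    have h := pv_ofList_map_inj (pv_lbl_inj hs) ((pvKs error_dict).map (pvGrp group_size))
    rw [List.map_map] at h
    simpa [Function.comp_def] using h
  rw [hA, hSetmap, List.map_map, hB]
  apply List.map_congr_left
  intro gi hgi
  simp only [Function.comp_def]
  -- the bucket of gi holds exactly the keys of group gi, in dict order; sorting it gives the
  -- filter of the sorted key list
  have hgi0 : gi ∈ PySem.Set.ofList ((pvD error_dict).keys.map (pvGrp group_size)) :=
    hG0perm.mem_iff.mp hgi
  have hval : (pvBuckets error_dict group_size).getD gi []
      = (pvD error_dict).keys.filter (fun k => pvGrp group_size k == gi) := by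
    have hmemit : (gi, (pvD error_dict).keys.filter (fun k => pvGrp group_size k == gi))
        ∈ (pvBuckets error_dict group_size).items := by
      rw [hBkItems]
      exact List.mem_map.mpr ⟨gi, hgi0, rfl⟩
    exact PySem.Dict.getD_of_mem_items _ hmemit hBkNodup []
  have hsortfilt : PySem.List.sorted
        ((pvD error_dict).keys.filter (fun k => pvGrp group_size k == gi)) (fun k => k) false
      = (pvKs error_dict).filter (fun k => pvGrp group_size k == gi) :=
    PySem.List.sorted_eq_of_perm_of_pairwise_lt _ _ _
      (hksperm.filter _)
      (List.Pairwise.sublist List.filter_sublist hkslt)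
  rw [hval, hsortfilt, PySem.List.foldl_append_eq_flatMap, List.nil_append]
  have hfilt : (pvKs error_dict).filter
      (fun k => pvLbl group_size (pvGrp group_size k) == pvLbl group_size gi)
      = (pvKs error_dict).filter (fun k => pvGrp group_size k == gi) := by
    apply List.filter_congr
    intro k _
    rw [Bool.eq_iff_iff, beq_iff_eq, beq_iff_eq]
    exact ⟨fun h => pv_lbl_inj hs h, fun h => by rw [h]⟩
  rw [hfilt]
  rfl

-- ---- keys of the dict of an association list are among its first components ----

theorem pv_keys_foldl_sub {ν : Type} : ∀ (l : List (Int × ν)) (d : PySem.Dict Int ν) (k : Int),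
    k ∈ (l.foldl (fun d p => d.insert p.1 p.2) d).keys → k ∈ d.keys ∨ k ∈ l.map Prod.fst := by
  intro l
  induction l with
  | nil => intro d k h; exact Or.inl h
  | cons p t ih =>
    intro d k h
    simp only [List.foldl_cons] at h
    rcases ih (d.insert p.1 p.2) k h with h' | h'
    · rcases (PySem.Dict.mem_keys_insert ..).mp h' with h'' | h''
      · exact Or.inr (by simp [h''])
      · exact Or.inl h''
    · exact Or.inr (by simp [h'])

theorem pv_mem_keys_ofList {ν : Type} (l : List (Int × ν)) (k : Int)
    (h : k ∈ (PySem.Dict.ofList l).keys) : k ∈ l.map Prod.fst := by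
  have h0 : (PySem.Dict.ofList l) = l.foldl (fun d p => d.insert p.1 p.2) PySem.Dict.empty := rfl
  rw [h0] at h
  rcases pv_keys_foldl_sub l PySem.Dict.empty k h with h' | h'
  · simp [PySem.Dict.keys, PySem.Dict.empty] at h'
  · exact h'

-- ===== VERDICT (by name: the statement is the Claim_ definition above) =====
theorem group_errors_spec : Claim_equal_group_errors := by
  intro error_dict group_size _ hpre
  unfold Spec_group_errors
  unfold Pre_group_errors at hpre
  rcases hpre with hpos | hed | ⟨hs, hsame⟩
  · apply pv_main_eq error_dict group_size (ne_of_gt hpos)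
    exact (PySem.List.sorted_pairwise (pvD error_dict).keys (fun k => k)).imp (pv_grp_mono hpos)
  · subst hed; rfl
  · apply pv_main_eq error_dict group_size hs
    apply List.pairwise_of_forall_mem_list
    intro a ha b hb
    have hsub : ∀ x ∈ pvKs error_dict, x ∈ error_dict.map Prod.fst := by
      intro x hx
      exact pv_mem_keys_ofList error_dict x
        ((PySem.List.sorted_perm (pvD error_dict).keys (fun k => k) false).mem_iff.mp hx)
    rcases List.mem_map.mp (hsub a ha) with ⟨pa, hpa, hpa1⟩
    rcases List.mem_map.mp (hsub b hb) with ⟨pb, hpb, hpb1⟩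
    have := hsame pa hpa pb hpb
    unfold pvGrp
    rw [← hpa1, ← hpb1, this]
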